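-- pv_equiv track=rewrite | github.com/Dima73/enigma2-plugin-signalfinder | src/plugin.py | parseTransponderBlocks
-- ===== SOURCE A (Python) =====
-- def parseTransponderBlocks(transponders_data):
-- 	transponders = {}
-- 	signatures = {}
-- 	tp_idx = 0
-- 	while tp_idx < len(transponders_data):
-- 		key_line = transponders_data[tp_idx]
-- 		key = key_line.strip()
-- 		block = [key_line]
-- 		tp_idx += 1
-- 		while tp_idx < len(transponders_data):
-- 			block.append(transponders_data[tp_idx])
-- 			if transponders_data[tp_idx].strip() == "/":
-- 				tp_idx += 1
-- 				break
-- 			tp_idx += 1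
-- 		if key:
-- 			transponders[key] = block
-- 			signature = tuple([x.strip() for x in block[1:]])
-- 			signatures[signature] = key
-- 	return transponders, signatures
-- ===== SOURCE B (Python) =====
-- def parseTransponderBlocks(transponders_data):
--     # pass 1: partition into (key, block) pairs with a state machine
--     blocks = []
--     key = None
--     block = None
--     for line in transponders_data:
--         if block is None:
--             key = line.strip()
--             block = [line]
--         else:
--             block.append(line)
--             if line.strip() == "/":
--                 blocks.append((key, block))
--                 block = None
--     if block is not None:
--         blocks.append((key, block))
--     # pass 2: build the two dicts from the blocks
--     transponders = {}
--     signatures = {}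
--     for key, block in blocks:
--         if key:
--             transponders[key] = block
--             signatures[tuple(x.strip() for x in block[1:])] = key
--     return transponders, signatures
-- ===== Notes on version B (the rewrite author's own statement) =====
-- stated objective: alternative
-- what changed: Replaces A's nested index-driven while loops with a single flat state-machine pass that partitions the lines into (key, block) pairs, followed by a separate pass that builds the two dicts from those pairs.
import Mathlib
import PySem

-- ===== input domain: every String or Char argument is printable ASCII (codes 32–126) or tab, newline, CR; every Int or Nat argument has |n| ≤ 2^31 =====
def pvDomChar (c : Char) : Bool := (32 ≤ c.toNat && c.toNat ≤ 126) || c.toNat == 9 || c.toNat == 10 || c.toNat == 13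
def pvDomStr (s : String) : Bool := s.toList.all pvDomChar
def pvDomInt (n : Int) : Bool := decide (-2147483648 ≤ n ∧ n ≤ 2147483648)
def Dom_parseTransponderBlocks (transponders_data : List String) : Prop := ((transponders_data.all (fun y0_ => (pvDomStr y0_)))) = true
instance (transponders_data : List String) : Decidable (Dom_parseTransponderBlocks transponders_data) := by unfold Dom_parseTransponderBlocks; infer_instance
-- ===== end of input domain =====

-- B replaces A's nested index-driven while loops by a flat state-machine pass that
-- partitions the lines into (key, block) pairs, followed by a second pass building
-- the two dicts from those pairs (objective: alternative decomposition, same cost).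

-- ===== PORT A =====
-- inner while loop of A: consume lines into block until one strips to "/" (inclusive);
-- returns (final block, remaining lines)
def innerA : List String → List String → List String × List String
  | [], block => (block, [])
  | l :: ls, block =>
      if PySem.Str.strip l = "/" then (block ++ [l], ls)
      else innerA ls (block ++ [l])

theorem innerA_snd_length : ∀ (ls block : List String), (innerA ls block).2.length ≤ ls.length
  | [], _ => Nat.le_refl _
  | l :: ls, block => by
      unfold innerA
      split
      · simp
      · exact Nat.le_trans (innerA_snd_length ls (block ++ [l])) (Nat.le_succ _)

-- outer while loop of A, carrying the two dicts
def outerA (rest : List String) (tp : PySem.Dict String (List String))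
    (sg : PySem.Dict (List String) String) :
    PySem.Dict String (List String) × PySem.Dict (List String) String :=
  match rest with
  | [] => (tp, sg)
  | key_line :: ls =>
      let key := PySem.Str.strip key_line
      let r := innerA ls [key_line]
      if key ≠ "" then
        outerA r.2 (tp.insert key r.1)
          (sg.insert ((r.1.drop 1).map PySem.Str.strip) key)
      else
        outerA r.2 tp sg
termination_by rest.length
decreasing_by
  · exact Nat.lt_succ_of_le (innerA_snd_length ls [key_line])
  · exact Nat.lt_succ_of_le (innerA_snd_length ls [key_line])

def parseTransponderBlocks (transponders_data : List String) :
    (List (String × List String)) × (List (List String × String)) :=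
  let r := outerA transponders_data PySem.Dict.empty PySem.Dict.empty
  (r.1.items, r.2.items)

-- ===== PORT B =====
-- pass 1 of B: the flat state machine partitioning the lines into (key, block) pairs
def pass1B : List String → Option (String × List String) → List (String × List String)
  | [], none => []
  | [], some kb => [kb]
  | l :: ls, none => pass1B ls (some (PySem.Str.strip l, [l]))
  | l :: ls, some (k, b) =>
      if PySem.Str.strip l = "/" then (k, b ++ [l]) :: pass1B ls none
      else pass1B ls (some (k, b ++ [l]))

-- pass 2 of B: build the two dicts from the (key, block) pairs
def pass2B : List (String × List String) → PySem.Dict String (List String) →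
    PySem.Dict (List String) String →
    PySem.Dict String (List String) × PySem.Dict (List String) String
  | [], tp, sg => (tp, sg)
  | (k, b) :: rest, tp, sg =>
      if k ≠ "" then
        pass2B rest (tp.insert k b) (sg.insert ((b.drop 1).map PySem.Str.strip) k)
      else
        pass2B rest tp sg

def parseTransponderBlocks_alt (transponders_data : List String) :
    (List (String × List String)) × (List (List String × String)) :=
  let r := pass2B (pass1B transponders_data none) PySem.Dict.empty PySem.Dict.empty
  (r.1.items, r.2.items)

-- ===== PRECONDITION & SPEC =====
def Spec_parseTransponderBlocks (transponders_data : List String) (out : (List (String × List String)) × (List (List String × String))) : Prop := out = parseTransponderBlocks_alt transponders_data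
instance (transponders_data : List String) (out : (List (String × List String)) × (List (List String × String))) : Decidable (Spec_parseTransponderBlocks transponders_data out) := by unfold Spec_parseTransponderBlocks; infer_instance

-- ===== CLAIM (what is proved, stated in full; the proofs are below) =====
def Claim_equal_parseTransponderBlocks : Prop := ∀ (transponders_data : List String), Dom_parseTransponderBlocks transponders_data → Spec_parseTransponderBlocks transponders_data (parseTransponderBlocks transponders_data)

-- ===== LEMMAS AND PROOFS =====

-- running B's state machine with an open block equals A's inner loop followed by
-- the state machine restarted on the remainder
theorem pass1B_some : ∀ (ls : List String) (k : String) (b : List String),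
    pass1B ls (some (k, b)) = (k, (innerA ls b).1) :: pass1B (innerA ls b).2 none
  | [], k, b => by simp [pass1B, innerA]
  | l :: ls, k, b => by
      by_cases h : PySem.Str.strip l = "/"
      · simp [pass1B, innerA, h]
      · simpa [pass1B, innerA, h] using pass1B_some ls k (b ++ [l])

theorem outerA_eq_passes : ∀ (n : ℕ) (ls : List String) (tp : PySem.Dict String (List String))
    (sg : PySem.Dict (List String) String), ls.length ≤ n →
    outerA ls tp sg = pass2B (pass1B ls none) tp sg := by
  intro n
  induction n with
  | zero =>
      intro ls tp sg h
      have : ls = [] := List.eq_nil_of_length_eq_zero (Nat.le_zero.mp h)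
      subst this
      simp [outerA, pass1B, pass2B]
  | succ n ih =>
      intro ls tp sg h
      match ls with
      | [] => simp [outerA, pass1B, pass2B]
      | key_line :: ls' =>
          rw [outerA]
          simp only [pass1B, pass1B_some, pass2B]
          have hlen : (innerA ls' [key_line]).2.length ≤ n :=
            Nat.le_trans (innerA_snd_length ls' [key_line]) (Nat.le_of_succ_le_succ h)
          split
          · exact ih _ _ _ hlen
          · exact ih _ _ _ hlen

-- ===== VERDICT (by name: the statement is the Claim_ definition above) =====
theorem parseTransponderBlocks_spec : Claim_equal_parseTransponderBlocks := by
  intro transponders_data _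
  unfold Spec_parseTransponderBlocks parseTransponderBlocks parseTransponderBlocks_alt
  rw [outerA_eq_passes transponders_data.length transponders_data _ _ (Nat.le_refl _)]
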